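-- pv_equiv track=rewrite | github.com/pypi-data/pypi-mirror-397 | packages/good-agent/good_agent-0.6.2-py3-none-any.whl/good_agent/core/mdxl.py | _apply_markdown_formatting
-- ===== SOURCE A (Python) =====
-- def _apply_markdown_formatting(text: str) -> str:
--     """Apply markdown formatting standardization.
--
--     Ensures proper spacing before and after headers and bold-only lines.
--
--     Args:
--         text: The markdown text to format
--
--     Returns:
--         Formatted markdown text
--     """
--
--     if not text:
--         return text
--
--     # Check if original text ends with blank line(s)
--     original_has_trailing_blank = text.rstrip() != text
--
--     lines = text.split("\n")
--     result: list[str] = []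
--
--     for i, line in enumerate(lines):
--         stripped = line.strip()
--
--         # Check if this line is a header or bold-only line
--         is_header = stripped.startswith("#")
--         is_bold_only = (
--             stripped.startswith("**")
--             and stripped.endswith("**")
--             and len(stripped) > 4
--             and not any(c in stripped[2:-2] for c in ["#", "*", "_"])
--         )
--
--         # Add blank line BEFORE headers and bold-only lines if not already present
--         if (is_header or is_bold_only) and i > 0:
--             # Check if we just added a line to result
--             if result and result[-1].strip():  # Previous line is not blank
--                 result.append("")
--
--         result.append(line)
--
--         # Add blank line AFTER headers only (not bold-only) if not already present
--         if is_header and i < len(lines) - 1: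
--             next_line = lines[i + 1] if i + 1 < len(lines) else ""
--             if next_line.strip():  # Next line is not blank
--                 result.append("")
--
--     # Clean up multiple consecutive blank lines
--     cleaned = []
--     blank_count = 0
--     for line in result:
--         is_blank = not line.strip()
--         if is_blank:
--             blank_count += 1
--             if blank_count <= 1:  # Allow max 1 blank line
--                 cleaned.append(line)
--         else:
--             blank_count = 0
--             cleaned.append(line)
--
--     # Preserve trailing blank line if original had one
--     if original_has_trailing_blank:
--         # Ensure exactly one trailing blank line
--         while cleaned and not cleaned[-1].strip():
--             cleaned.pop()
--         cleaned.append("")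
--     else:
--         # Remove all trailing blank lines
--         while cleaned and not cleaned[-1].strip():
--             cleaned.pop()
--
--     return "\n".join(cleaned)
-- ===== SOURCE B (Python) =====
-- def _apply_markdown_formatting(text: str) -> str:
--     """Single streaming pass: insert/collapse blank lines around headers and
--     bold-only lines while emitting, instead of build-then-clean passes."""
--     if not text:
--         return text
--
--     has_trailing_blank = text.rstrip() != text
--     lines = text.split("\n")
--     n = len(lines)
--
--     out: list[str] = []
--     last_blank = False  # whether the last emitted line is blank
--
--     for i, line in enumerate(lines):
--         stripped = line.strip()
--         is_header = stripped.startswith("#")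
--         is_bold_only = (
--             stripped.startswith("**")
--             and stripped.endswith("**")
--             and len(stripped) > 4
--             and not any(c in stripped[2:-2] for c in ["#", "*", "_"])
--         )
--
--         if (is_header or is_bold_only) and i > 0 and not last_blank:
--             out.append("")
--             last_blank = True
--
--         if stripped:
--             out.append(line)
--             last_blank = False
--             if is_header and i < n - 1 and lines[i + 1].strip():
--                 out.append("")
--                 last_blank = True
--         elif not last_blank:
--             out.append(line)
--             last_blank = True
--
--     # trailing-blank normalisation (same rule as the original)
--     while out and not out[-1].strip():
--         out.pop()
--     if has_trailing_blank:
--         out.append("")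
--
--     return "\n".join(out)
-- ===== Notes on version B (the rewrite author's own statement) =====
-- stated objective: alternative
-- what changed: Replaces A's build-then-clean pipeline (one pass inserting blanks into a result list, a second pass collapsing consecutive blanks with a counter) by a single streaming pass that tracks only a last-emitted-blank flag and never emits a second consecutive blank, with the same trailing-blank normalisation.
import Mathlib
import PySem

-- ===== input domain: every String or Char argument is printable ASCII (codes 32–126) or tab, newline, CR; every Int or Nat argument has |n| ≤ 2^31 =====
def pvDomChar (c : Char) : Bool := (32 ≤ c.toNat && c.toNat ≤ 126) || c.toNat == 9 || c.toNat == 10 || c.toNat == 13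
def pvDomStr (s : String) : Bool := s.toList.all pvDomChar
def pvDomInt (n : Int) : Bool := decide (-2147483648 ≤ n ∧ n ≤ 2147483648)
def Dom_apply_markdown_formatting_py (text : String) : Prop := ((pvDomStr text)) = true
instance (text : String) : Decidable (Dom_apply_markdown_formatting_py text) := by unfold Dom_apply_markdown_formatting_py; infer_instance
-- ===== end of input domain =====

-- B replaces A's three passes (insert blanks, collapse blank runs, fix trailing) by one
-- streaming pass with a last-emitted-blank flag; same return value (objective: alternative).

-- Shared classification helpers: both Pythons contain these identical expressions.
def pvIsHeader (stripped : String) : Bool := PySem.Str.startswith stripped "#"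

def pvIsBoldOnly (stripped : String) : Bool :=
  PySem.Str.startswith stripped "**" && PySem.Str.endswith stripped "**" &&
  decide (4 < PySem.Str.len stripped) &&
  !(["#", "*", "_"].any (fun c => PySem.Str.isIn c (PySem.Str.slice stripped (some 2) (some (-2)))))

-- 'while cleaned and not cleaned[-1].strip(): cleaned.pop()'  (identical loop in both Pythons)
def pvDropTrailing (xs : List String) : List String :=
  (xs.reverse.dropWhile (fun l => PySem.Str.strip l == "")).reverse

-- ===== PORT A =====
-- the 'for i, line in enumerate(lines)' loop building 'result'
def pvBuildGo (lines : List String) (i : Nat) (rest : List String) (result : List String) :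
    List String :=
  match rest with
  | [] => result
  | line :: rs =>
    let stripped := PySem.Str.strip line
    let isH := pvIsHeader stripped
    let isB := pvIsBoldOnly stripped
    let result :=
      if (isH || isB) && decide (0 < i) then
        match result.getLast? with
        | some t => if PySem.Str.strip t ≠ "" then result ++ [""] else result
        | none => result
      else result
    let result := result ++ [line]
    let result :=
      if isH && decide (i < lines.length - 1) then
        let next_line := if i + 1 < lines.length then lines.getD (i + 1) "" else ""
        if PySem.Str.strip next_line ≠ "" then result ++ [""] else result
      else result
    pvBuildGo lines (i + 1) rs result

-- the clean-up loop with 'blank_count'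
def pvCleanGo (blank_count : Int) (rest : List String) : List String :=
  match rest with
  | [] => []
  | line :: rs =>
    if PySem.Str.strip line == "" then
      (if blank_count + 1 ≤ 1 then [line] else []) ++ pvCleanGo (blank_count + 1) rs
    else
      line :: pvCleanGo 0 rs

def apply_markdown_formatting_py (text : String) : String :=
  if text = "" then text
  else
    let original_has_trailing_blank := PySem.Str.rstrip text ≠ text
    let lines := (PySem.Str.split? text "\n").getD []   -- sep "\n" ≠ "": never none
    let result := pvBuildGo lines 0 lines []
    let cleaned := pvCleanGo 0 result
    if original_has_trailing_blank then
      PySem.Str.join "\n" (pvDropTrailing cleaned ++ [""])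
    else
      PySem.Str.join "\n" (pvDropTrailing cleaned)

-- ===== PORT B =====
-- the single streaming loop of Source B: accumulator 'out' plus the 'last_blank' flag
def pvAltGo (lines : List String) (i : Nat) (rest : List String) (out : List String)
    (last_blank : Bool) : List String :=
  match rest with
  | [] => out
  | line :: rs =>
    let stripped := PySem.Str.strip line
    let isH := pvIsHeader stripped
    let isB := pvIsBoldOnly stripped
    let p := (isH || isB) && decide (0 < i) && !last_blank
    let out := if p then out ++ [""] else out
    let last_blank := if p then true else last_blank
    if stripped ≠ "" then
      if isH && decide (i < lines.length - 1) &&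
          (PySem.Str.strip (lines.getD (i + 1) "") ≠ "") then
        pvAltGo lines (i + 1) rs (out ++ [line] ++ [""]) true
      else
        pvAltGo lines (i + 1) rs (out ++ [line]) false
    else
      if !last_blank then pvAltGo lines (i + 1) rs (out ++ [line]) true
      else pvAltGo lines (i + 1) rs out true

def apply_markdown_formatting_py_alt (text : String) : String :=
  if text = "" then text
  else
    let has_trailing_blank := PySem.Str.rstrip text ≠ text
    let lines := (PySem.Str.split? text "\n").getD []   -- sep "\n" ≠ "": never none
    let out := pvDropTrailing (pvAltGo lines 0 lines [] false)
    if has_trailing_blank then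
      PySem.Str.join "\n" (out ++ [""])
    else
      PySem.Str.join "\n" (out)

-- ===== PRECONDITION & SPEC =====
def Spec_apply_markdown_formatting_py (text : String) (out : String) : Prop := out = apply_markdown_formatting_py_alt text
instance (text : String) (out : String) : Decidable (Spec_apply_markdown_formatting_py text out) := by unfold Spec_apply_markdown_formatting_py; infer_instance

-- ===== CLAIM (what is proved, stated in full; the proofs are below) =====
def Claim_equal_apply_markdown_formatting_py : Prop := ∀ (text : String), Dom_apply_markdown_formatting_py text → Spec_apply_markdown_formatting_py text (apply_markdown_formatting_py text)

-- ===== LEMMAS AND PROOFS =====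

-- emission form of A's building loop: state = (first iteration?, last emitted line blank?)
def pvEmitA (first : Bool) (lastBlank : Bool) : List String → List String
  | [] => []
  | line :: rs =>
    let stripped := PySem.Str.strip line
    let isH := pvIsHeader stripped
    let isB := pvIsBoldOnly stripped
    let pre := if (isH || isB) && !first && !lastBlank then [""] else []
    let postFlag := isH && decide (rs ≠ []) && (PySem.Str.strip (rs.headD "") ≠ "")
    let post := if postFlag then [""] else []
    pre ++ [line] ++ post ++ pvEmitA false (if postFlag then true else (stripped == "")) rs

-- emission form of B's loop
def pvEmitB (first : Bool) (lastBlank : Bool) : List String → List String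
  | [] => []
  | line :: rs =>
    let stripped := PySem.Str.strip line
    let isH := pvIsHeader stripped
    let isB := pvIsBoldOnly stripped
    let p := (isH || isB) && !first && !lastBlank
    let pre := if p then [""] else []
    let lb1 := if p then true else lastBlank
    if stripped ≠ "" then
      let postFlag := isH && decide (rs ≠ []) && (PySem.Str.strip (rs.headD "") ≠ "")
      pre ++ [line] ++ (if postFlag then [""] else []) ++ pvEmitB false postFlag rs
    else
      pre ++ (if !lb1 then [line] else []) ++ pvEmitB false true rs

def pvLastBlankOf (res : List String) : Bool :=
  match res.getLast? with
  | some t => PySem.Str.strip t == ""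
  | none => false

lemma pvStripEmpty : PySem.Str.strip "" = "" := rfl
lemma pvHeaderEmpty : pvIsHeader "" = false := rfl
lemma pvBoldEmpty : pvIsBoldOnly "" = false := by decide

lemma pvBridgeA : ∀ (rest lines : List String) (i : Nat) (res : List String),
    lines.drop i = rest → (i = 0 ↔ res = []) →
    pvBuildGo lines i rest res = res ++ pvEmitA (decide (i = 0)) (pvLastBlankOf res) rest := by
  intro rest
  induction rest with
  | nil => intro lines i res _ _; simp [pvBuildGo, pvEmitA]
  | cons line rs ih =>
    intro lines i res hdrop hres
    have hlt : i < lines.length := by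
      by_contra hge
      rw [List.drop_eq_nil_of_le (by omega)] at hdrop
      simp at hdrop
    have hlen : rs.length + 1 = lines.length - i := by
      have h1 : (lines.drop i).length = lines.length - i := List.length_drop
      rw [hdrop] at h1
      simpa using h1
    have hdrop1 : lines.drop (i + 1) = rs := by
      have h2 : (lines.drop i).tail = lines.drop (i + 1) := List.tail_drop
      rw [hdrop] at h2
      simpa using h2.symm
    have hnext : lines.getD (i + 1) "" = rs.headD "" := by
      have h2 : lines[i + 1]? = rs.head? := by
        rw [← List.head?_drop, hdrop1]
      simp [List.getD_eq_getElem?_getD, h2, List.headD_eq_head?_getD]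
    have hiffpost : (i < lines.length - 1) = ¬(rs = []) := by
      apply propext
      cases rs <;> simp_all <;> omega
    have hiff1 : (i + 1 < lines.length) = ¬(rs = []) := by
      apply propext
      cases rs <;> simp_all <;> omega
    have IH : ∀ res' : List String, res' ≠ [] →
        pvBuildGo lines (i + 1) rs res' = res' ++ pvEmitA false (pvLastBlankOf res') rs := by
      intro res' h
      have h3 := ih lines (i + 1) res' hdrop1
        ⟨fun hx => absurd hx (Nat.succ_ne_zero i), fun hx => absurd hx h⟩
      simpa using h3
    by_cases hi : i = 0
    · have hres0 : res = [] := hres.mp hi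
      subst hres0; subst hi
      simp only [pvBuildGo, pvEmitA, hnext, hiffpost, hiff1]
      by_cases hH : pvIsHeader (PySem.Str.strip line) = true <;>
      by_cases hBd : pvIsBoldOnly (PySem.Str.strip line) = true <;>
      by_cases hrs : rs = [] <;>
      by_cases hhd : PySem.Str.strip (rs.head?.getD "") = "" <;>
      simp [hH, hBd, hrs, hhd, pvLastBlankOf, pvStripEmpty, IH, pvBuildGo, pvEmitA]
    · have hresne : res ≠ [] := fun h => hi (hres.mpr h)
      obtain ⟨t, ht⟩ : ∃ t, res.getLast? = some t := by
        cases hq : res.getLast? with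
        | none => exact absurd (List.getLast?_eq_none_iff.mp hq) hresne
        | some t => exact ⟨t, rfl⟩
      have hlb : pvLastBlankOf res = (PySem.Str.strip t == "") := by
        simp [pvLastBlankOf, ht]
      have hpos : (0 < i) = ¬(i = 0) := by
        apply propext; omega
      simp only [pvBuildGo, pvEmitA, hnext, hiffpost, hiff1, hpos, ht, hlb]
      by_cases hH : pvIsHeader (PySem.Str.strip line) = true <;>
      by_cases hBd : pvIsBoldOnly (PySem.Str.strip line) = true <;>
      by_cases hbt : PySem.Str.strip t = "" <;>
      by_cases hrs : rs = [] <;>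
      by_cases hhd : PySem.Str.strip (rs.head?.getD "") = "" <;>
      simp [hH, hBd, hbt, hrs, hhd, hi, pvLastBlankOf, pvStripEmpty,
        IH, ht, pvBuildGo, pvEmitA]

lemma pvBridgeB : ∀ (rest lines : List String) (i : Nat) (out : List String) (lb : Bool),
    lines.drop i = rest →
    pvAltGo lines i rest out lb = out ++ pvEmitB (decide (i = 0)) lb rest := by
  intro rest
  induction rest with
  | nil => intro lines i out lb _; simp [pvAltGo, pvEmitB]
  | cons line rs ih =>
    intro lines i out lb hdrop
    have hlt : i < lines.length := by
      by_contra hge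
      rw [List.drop_eq_nil_of_le (by omega)] at hdrop
      simp at hdrop
    have hlen : rs.length + 1 = lines.length - i := by
      have h1 : (lines.drop i).length = lines.length - i := List.length_drop
      rw [hdrop] at h1
      simpa using h1
    have hdrop1 : lines.drop (i + 1) = rs := by
      have h2 : (lines.drop i).tail = lines.drop (i + 1) := List.tail_drop
      rw [hdrop] at h2
      simpa using h2.symm
    have hnext : lines.getD (i + 1) "" = rs.headD "" := by
      have h2 : lines[i + 1]? = rs.head? := by
        rw [← List.head?_drop, hdrop1]
      simp [List.getD_eq_getElem?_getD, h2, List.headD_eq_head?_getD]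
    have hiffpost : (i < lines.length - 1) = ¬(rs = []) := by
      apply propext
      cases rs <;> simp_all <;> omega
    have hpos : (0 < i) = ¬(i = 0) := by
      apply propext; omega
    have IH : ∀ (out' : List String) (lb' : Bool),
        pvAltGo lines (i + 1) rs out' lb' = out' ++ pvEmitB false lb' rs := by
      intro out' lb'
      have h3 := ih lines (i + 1) out' lb' hdrop1
      simpa using h3
    by_cases hi : i = 0
    · subst hi
      norm_num at IH
      simp only [pvAltGo, pvEmitB, hnext, hiffpost, hpos]
      by_cases hb : PySem.Str.strip line = "" <;>
      by_cases hH : pvIsHeader (PySem.Str.strip line) = true <;>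
      by_cases hBd : pvIsBoldOnly (PySem.Str.strip line) = true <;>
      cases lb <;>
      by_cases hrs : rs = [] <;>
      by_cases hhd : PySem.Str.strip (rs.head?.getD "") = "" <;>
      simp [hb, hH, hBd, hrs, hhd, IH, pvAltGo, pvEmitB, pvHeaderEmpty, pvBoldEmpty]
    · simp only [pvAltGo, pvEmitB, hnext, hiffpost, hpos]
      by_cases hb : PySem.Str.strip line = "" <;>
      by_cases hH : pvIsHeader (PySem.Str.strip line) = true <;>
      by_cases hBd : pvIsBoldOnly (PySem.Str.strip line) = true <;>
      cases lb <;>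
      by_cases hrs : rs = [] <;>
      by_cases hhd : PySem.Str.strip (rs.head?.getD "") = "" <;>
      simp [hb, hH, hBd, hi, hrs, hhd, IH, pvAltGo, pvEmitB, pvHeaderEmpty, pvBoldEmpty]

lemma pvMain : ∀ (rest : List String) (first : Bool) (c : Int),
    0 ≤ c →
    pvCleanGo c (pvEmitA first (decide (c ≠ 0)) rest) = pvEmitB first (decide (c ≠ 0)) rest := by
  intro rest
  induction rest with
  | nil => intro first c hc; simp [pvEmitA, pvEmitB, pvCleanGo]
  | cons line rs ih =>
    intro first c hc
    by_cases hb : PySem.Str.strip line = ""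
    · have h1 : (c + 1 : Int) ≠ 0 := by omega
      have ih1 := ih false (c+1) (by omega)
      rw [decide_eq_true h1] at ih1
      simp only [pvEmitA, pvEmitB, hb, pvHeaderEmpty, pvBoldEmpty]
      by_cases hc0 : c = 0
      · subst hc0
        norm_num at ih1
        simp [pvCleanGo, hb, ih1]
      · have h2 : ¬(c + 1 ≤ (1:Int)) := by omega
        simp [pvCleanGo, hb, ih1, hc0, h2]
    · have hbne : (PySem.Str.strip line == "") = false := by simp [hb]
      have ih0 := ih false 0 (by omega)
      have ih1 := ih false 1 (by omega)
      rw [show (decide ((0:Int) ≠ 0)) = false from rfl] at ih0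
      rw [show (decide ((1:Int) ≠ 0)) = true from rfl] at ih1
      simp only [pvEmitA, pvEmitB]
      by_cases hH : pvIsHeader (PySem.Str.strip line) = true <;>
      by_cases hBd : pvIsBoldOnly (PySem.Str.strip line) = true <;>
      by_cases hrs : rs = [] <;>
      by_cases hhd : PySem.Str.strip (rs.head?.getD "") = "" <;>
      by_cases hfi : first = true <;>
      by_cases hc0 : c = 0 <;>
      simp [pvCleanGo, pvEmitA, pvEmitB, hb, hbne, hH, hBd, hrs, hhd, hfi, hc0, ih0, ih1, pvStripEmpty]

-- ===== VERDICT (by name: the statement is the Claim_ definition above) =====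
theorem apply_markdown_formatting_py_spec : Claim_equal_apply_markdown_formatting_py := by
  intro text _
  unfold Spec_apply_markdown_formatting_py apply_markdown_formatting_py apply_markdown_formatting_py_alt
  by_cases h : text = ""
  · simp [h]
  · simp only [h, if_false]
    have hA := pvBridgeA ((PySem.Str.split? text "\n").getD []) ((PySem.Str.split? text "\n").getD []) 0 [] (by simp) (by simp)
    have hB := pvBridgeB ((PySem.Str.split? text "\n").getD []) ((PySem.Str.split? text "\n").getD []) 0 [] false (by simp)
    have hM := pvMain ((PySem.Str.split? text "\n").getD []) true 0 (le_refl 0)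
    have hL : pvLastBlankOf ([] : List String) = false := rfl
    have hd : (decide ((0:Int) ≠ 0)) = false := rfl
    rw [hL] at hA
    rw [hd] at hM
    simp only [List.nil_append, decide_true] at hA hB
    rw [hA, hB, hM]
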